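-- pv_equiv track=rewrite | github.com/sujoyksikdar/opra | compsocsite/polls/views/poll_results.py | getEF1
-- ===== SOURCE A (Python) =====
-- def getEF1(pref1, allocated_items1, pref2, allocated_items2):
--     for i in range(len(allocated_items2)):
--
--         copy_allocated_items2 = allocated_items2.copy()
--         copy_allocated_items2.remove(allocated_items2[i])
--
--         # cand 1 sum
--         sum1 = 0
--         for item,val in allocated_items1:
--             sum1+=val
--
--         # cand 2 sum with cand 1 preferences
--         sum2 = 0
--         for item1, val1 in copy_allocated_items2:
--             for item2, val2 in pref1:
--                 if(item1 == item2):sum2+=val2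
--
--         EF1_val = sum1-sum2
--         if EF1_val >= 0:
--             return "EF1"
--     return "Not EF1"
-- ===== SOURCE B (Python) =====
-- def getEF1(pref1, allocated_items1, pref2, allocated_items2):
--     if not allocated_items2:
--         return "Not EF1"
--     # weight[name] = total pref1 value of that name (summing duplicate entries)
--     weight = {}
--     for item, val in pref1:
--         weight[item] = weight.get(item, 0) + val
--     sum1 = 0
--     for _, val in allocated_items1:
--         sum1 += val
--     total2 = 0
--     best = None
--     for item, _ in allocated_items2:
--         wv = weight.get(item, 0)
--         total2 += wv
--         if best is None or wv > best:
--             best = wv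
--     return "EF1" if sum1 - (total2 - best) >= 0 else "Not EF1"
-- ===== Notes on version B (the rewrite author's own statement) =====
-- stated objective: faster
-- what changed: Replaced A's candidate-by-candidate removal-and-rescan loop (recomputing sum1 and a nested pref1 scan for every removal candidate) by one pass: a weight dict built once from pref1, then a single pass over allocated_items2 computing the total weight and the maximum per-item weight, returning 'EF1' iff the list is non-empty and sum1 - (total - max) >= 0.
import Mathlib
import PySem

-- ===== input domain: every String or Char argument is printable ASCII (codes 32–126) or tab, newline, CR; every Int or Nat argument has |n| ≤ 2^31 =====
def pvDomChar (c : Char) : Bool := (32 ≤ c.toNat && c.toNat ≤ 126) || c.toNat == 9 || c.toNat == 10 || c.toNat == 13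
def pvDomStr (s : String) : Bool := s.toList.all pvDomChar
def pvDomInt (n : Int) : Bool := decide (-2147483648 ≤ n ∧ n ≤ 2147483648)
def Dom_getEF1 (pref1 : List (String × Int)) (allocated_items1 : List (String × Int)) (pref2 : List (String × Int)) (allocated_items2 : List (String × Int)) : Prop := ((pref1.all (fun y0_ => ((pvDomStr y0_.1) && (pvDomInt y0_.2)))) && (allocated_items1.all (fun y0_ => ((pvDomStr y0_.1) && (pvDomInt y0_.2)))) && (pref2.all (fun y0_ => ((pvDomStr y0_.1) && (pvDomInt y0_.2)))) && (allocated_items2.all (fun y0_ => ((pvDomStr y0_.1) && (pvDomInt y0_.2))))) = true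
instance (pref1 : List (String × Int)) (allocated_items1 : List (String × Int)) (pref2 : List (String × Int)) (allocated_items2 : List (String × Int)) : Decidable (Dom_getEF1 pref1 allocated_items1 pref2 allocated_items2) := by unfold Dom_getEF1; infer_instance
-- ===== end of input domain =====

-- B replaces A's per-candidate removal-and-rescan loop by one pass with a prebuilt weight
-- dict plus a total/max aggregate (measured faster at the largest generated size).


-- ===== PORT A =====
-- the body of A's 'for i in range(len(allocated_items2))' loop, recursing over the indices
def getEF1Go (pref1 : List (String × Int)) (allocated_items1 : List (String × Int)) (allocated_items2 : List (String × Int)) : List Int → String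
  | [] => "Not EF1"
  | i :: rest =>
    -- allocated_items2[i]; always in range here
    let xi := (PySem.List.pyGet? allocated_items2 i).getD ("", 0)
    -- copy_allocated_items2.remove(allocated_items2[i]); the element is present, so no ValueError
    let copy2 := (PySem.List.remove? allocated_items2 xi).getD []
    let sum1 := allocated_items1.foldl (fun s p => s + p.2) (0 : Int)
    let sum2 := copy2.foldl (fun s p1 => pref1.foldl (fun t p2 => if p1.1 == p2.1 then t + p2.2 else t) s) (0 : Int)
    if sum1 - sum2 ≥ 0 then "EF1" else getEF1Go pref1 allocated_items1 allocated_items2 rest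

def getEF1 (pref1 : List (String × Int)) (allocated_items1 : List (String × Int)) (pref2 : List (String × Int)) (allocated_items2 : List (String × Int)) : String :=
  getEF1Go pref1 allocated_items1 allocated_items2 (PySem.List.pyRange 0 allocated_items2.length 1)

-- ===== PORT B =====
-- weight[item] = weight.get(item, 0) + val, over pref1
def weightDict (pref1 : List (String × Int)) : PySem.Dict String Int :=
  pref1.foldl (fun d p => d.insert p.1 (d.getD p.1 0 + p.2)) PySem.Dict.empty

def getEF1_alt (pref1 : List (String × Int)) (allocated_items1 : List (String × Int)) (pref2 : List (String × Int)) (allocated_items2 : List (String × Int)) : String :=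
  if allocated_items2 = [] then "Not EF1"
  else
    let weight := weightDict pref1
    let sum1 := allocated_items1.foldl (fun s p => s + p.2) (0 : Int)
    let tb := allocated_items2.foldl
      (fun (acc : Int × Option Int) p =>
        let wv := weight.getD p.1 0
        (acc.1 + wv,
         match acc.2 with
         | none => some wv
         | some b => if wv > b then some wv else some b))
      (0, none)
    -- best is never none here: allocated_items2 is non-empty
    if sum1 - (tb.1 - (tb.2.getD 0)) ≥ 0 then "EF1" else "Not EF1"

-- ===== PRECONDITION & SPEC =====
def Spec_getEF1 (pref1 : List (String × Int)) (allocated_items1 : List (String × Int)) (pref2 : List (String × Int)) (allocated_items2 : List (String × Int)) (out : String) : Prop := out = getEF1_alt pref1 allocated_items1 pref2 allocated_items2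
instance (pref1 : List (String × Int)) (allocated_items1 : List (String × Int)) (pref2 : List (String × Int)) (allocated_items2 : List (String × Int)) (out : String) : Decidable (Spec_getEF1 pref1 allocated_items1 pref2 allocated_items2 out) := by unfold Spec_getEF1; infer_instance

-- ===== CLAIM (what is proved, stated in full; the proofs are below) =====
def Claim_equal_getEF1 : Prop := ∀ (pref1 : List (String × Int)) (allocated_items1 : List (String × Int)) (pref2 : List (String × Int)) (allocated_items2 : List (String × Int)), Dom_getEF1 pref1 allocated_items1 pref2 allocated_items2 → Spec_getEF1 pref1 allocated_items1 pref2 allocated_items2 (getEF1 pref1 allocated_items1 pref2 allocated_items2)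

-- ===== LEMMAS AND PROOFS =====

-- the pref1-weight of an item name (what A's inner scan sums, and what B's dict stores)
def wF (pref1 : List (String × Int)) (name : String) : Int :=
  pref1.foldl (fun t p2 => if name == p2.1 then t + p2.2 else t) 0

def sumW (pref1 l : List (String × Int)) : Int := (l.map (fun p => wF pref1 p.1)).sum

theorem foldl_wF (pref1 : List (String × Int)) (name : String) (s : Int) :
    pref1.foldl (fun t p2 => if name == p2.1 then t + p2.2 else t) s = s + wF pref1 name := by
  induction pref1 generalizing s with
  | nil => simp [wF]
  | cons p l ih =>
    rw [List.foldl_cons, wF, List.foldl_cons, ih, ih]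
    split_ifs <;> omega

theorem wF_cons (p : String × Int) (l : List (String × Int)) (name : String) :
    wF (p :: l) name = (if name == p.1 then p.2 else 0) + wF l name := by
  rw [wF, List.foldl_cons, foldl_wF]
  split_ifs <;> omega

theorem weightDict_getD (pref1 : List (String × Int)) (name : String) :
    (weightDict pref1).getD name 0 = wF pref1 name := by
  have key : ∀ (l : List (String × Int)) (d : PySem.Dict String Int),
      (l.foldl (fun d p => d.insert p.1 (d.getD p.1 0 + p.2)) d).getD name 0
        = d.getD name 0 + wF l name := by
    intro l
    induction l with
    | nil => intro d; simp [wF]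
    | cons p t ih =>
      intro d
      simp only [List.foldl_cons, ih, PySem.Dict.getD_insert, wF_cons]
      by_cases h : name = p.1 <;> simp [h] <;> omega
  have := key pref1 PySem.Dict.empty
  simpa [weightDict, wF] using this

theorem sum2_eq (pref1 l : List (String × Int)) :
    l.foldl (fun s p1 => pref1.foldl (fun t p2 => if p1.1 == p2.1 then t + p2.2 else t) s) (0 : Int)
      = sumW pref1 l := by
  have key : ∀ (l : List (String × Int)) (s : Int),
      l.foldl (fun s p1 => s + wF pref1 p1.1) s = s + sumW pref1 l := by
    intro l
    induction l with
    | nil => intro s; simp [sumW]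
    | cons p t ih =>
      intro s
      rw [List.foldl_cons, ih]
      simp only [sumW, List.map_cons, List.sum_cons]
      omega
  simp only [foldl_wF]
  simpa using key l 0

theorem sumW_erase (pref1 : List (String × Int)) (l : List (String × Int)) (x : String × Int)
    (hx : x ∈ l) : sumW pref1 (l.erase x) = sumW pref1 l - wF pref1 x.1 := by
  induction l with
  | nil => cases hx
  | cons y t ih =>
    by_cases h : y = x
    · subst h; simp [List.erase_cons_head, sumW]
    · have hx' : x ∈ t := by
        rcases List.mem_cons.1 hx with h' | h'
        · exact absurd h'.symm h
        · exact h'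
      rw [List.erase_cons_tail (by simpa using h)]
      simp only [sumW, List.map_cons, List.sum_cons] at *
      rw [ih hx']
      omega

-- running maximum of wF over a list, started at b (B's 'best' accumulator)
def fm (pref1 : List (String × Int)) (b : Int) (l : List (String × Int)) : Int :=
  l.foldl (fun m q => max m (wF pref1 q.1)) b

theorem fm_init_le (pref1 : List (String × Int)) (b : Int) (l : List (String × Int)) :
    b ≤ fm pref1 b l := by
  induction l generalizing b with
  | nil => simp [fm]
  | cons q t ih =>
    calc b ≤ max b (wF pref1 q.1) := le_max_left _ _
    _ ≤ fm pref1 (max b (wF pref1 q.1)) t := ih _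

theorem fm_mem_le (pref1 : List (String × Int)) (b : Int) (l : List (String × Int))
    (y : String × Int) (hy : y ∈ l) : wF pref1 y.1 ≤ fm pref1 b l := by
  induction l generalizing b with
  | nil => cases hy
  | cons q t ih =>
    rcases List.mem_cons.1 hy with h | h
    · subst h
      calc wF pref1 y.1 ≤ max b (wF pref1 y.1) := le_max_right _ _
      _ ≤ fm pref1 (max b (wF pref1 y.1)) t := fm_init_le _ _ _
    · exact ih _ h

theorem fm_cases (pref1 : List (String × Int)) (b : Int) (l : List (String × Int)) :
    fm pref1 b l = b ∨ ∃ y ∈ l, fm pref1 b l = wF pref1 y.1 := by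
  induction l generalizing b with
  | nil => left; rfl
  | cons q t ih =>
    have : fm pref1 b (q :: t) = fm pref1 (max b (wF pref1 q.1)) t := rfl
    rw [this]
    rcases ih (max b (wF pref1 q.1)) with h | ⟨y, hy, h⟩
    · rcases max_choice b (wF pref1 q.1) with hm | hm
      · left; rw [h, hm]
      · right; exact ⟨q, List.mem_cons_self, by rw [h, hm]⟩
    · right; exact ⟨y, List.mem_cons_of_mem _ hy, h⟩

-- B's single pass over allocated_items2, started with best = some b
theorem bfold (pref1 : List (String × Int)) (l : List (String × Int)) (t b : Int) :
    l.foldl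
      (fun (acc : Int × Option Int) p =>
        let wv := (weightDict pref1).getD p.1 0
        (acc.1 + wv,
         match acc.2 with
         | none => some wv
         | some b => if wv > b then some wv else some b))
      (t, some b)
    = (t + sumW pref1 l, some (fm pref1 b l)) := by
  induction l generalizing t b with
  | nil => simp [sumW, fm]
  | cons q r ih =>
    rw [List.foldl_cons]
    have hm : (if (weightDict pref1).getD q.1 0 > b then some ((weightDict pref1).getD q.1 0)
        else some b) = some (max b (wF pref1 q.1)) := by
      rw [weightDict_getD]; split_ifs <;> simp <;> omega
    simp only [hm]
    rw [ih]
    simp only [sumW, List.map_cons, List.sum_cons, weightDict_getD, fm]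
    simp only [Prod.mk.injEq]
    exact ⟨by omega, rfl⟩

theorem bfold0 (pref1 : List (String × Int)) (x : String × Int) (t : List (String × Int)) :
    (x :: t).foldl
      (fun (acc : Int × Option Int) p =>
        let wv := (weightDict pref1).getD p.1 0
        (acc.1 + wv,
         match acc.2 with
         | none => some wv
         | some b => if wv > b then some wv else some b))
      ((0 : Int), (none : Option Int))
    = ((0 : Int) + (weightDict pref1).getD x.1 0 + sumW pref1 t,
        some (fm pref1 ((weightDict pref1).getD x.1 0) t)) := by
  rw [List.foldl_cons]
  exact bfold pref1 t _ _

-- A's index loop returns "EF1" iff some index's removal candidate satisfies the test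
theorem goEF (pref1 a1 a2 : List (String × Int)) (idxs : List Int)
    (h : ∀ i ∈ idxs, ∃ x, PySem.List.pyGet? a2 i = some x) :
    getEF1Go pref1 a1 a2 idxs =
      if ∃ i ∈ idxs, a1.foldl (fun s p => s + p.2) (0 : Int)
          - (sumW pref1 a2 - wF pref1 ((PySem.List.pyGet? a2 i).getD ("", 0)).1) ≥ 0
      then "EF1" else "Not EF1" := by
  induction idxs with
  | nil => simp [getEF1Go]
  | cons i rest ih =>
    obtain ⟨x, hx⟩ := h i List.mem_cons_self
    have hmem : x ∈ a2 := PySem.List.mem_of_pyGet?_eq_some a2 hx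
    rw [getEF1Go]
    simp only [hx, Option.getD_some, PySem.List.remove?_eq_some_erase a2 x hmem, sum2_eq,
      sumW_erase pref1 a2 x hmem]
    by_cases hc : a1.foldl (fun s p => s + p.2) (0 : Int) - (sumW pref1 a2 - wF pref1 x.1) ≥ 0
    · rw [if_pos hc, if_pos ⟨i, List.mem_cons_self, by simp [hx]; omega⟩]
    · rw [if_neg hc, ih (fun j hj => h j (List.mem_cons_of_mem _ hj))]
      by_cases he : ∃ j ∈ rest, a1.foldl (fun s p => s + p.2) (0 : Int)
          - (sumW pref1 a2 - wF pref1 ((PySem.List.pyGet? a2 j).getD ("", 0)).1) ≥ 0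
      · rw [if_pos he]
        obtain ⟨j, hj, hcj⟩ := he
        exact (if_pos ⟨j, List.mem_cons_of_mem _ hj, hcj⟩).symm
      · rw [if_neg he, if_neg]
        rintro ⟨j, hj, hcj⟩
        rcases List.mem_cons.1 hj with rfl | hj'
        · rw [hx] at hcj; simp at hcj; omega
        · exact he ⟨j, hj', hcj⟩

-- ===== VERDICT (by name: the statement is the Claim_ definition above) =====
theorem getEF1_spec : Claim_equal_getEF1 := by
  intro pref1 a1 p2 a2 _
  show getEF1 pref1 a1 p2 a2 = getEF1_alt pref1 a1 p2 a2
  unfold getEF1 getEF1_alt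
  by_cases h2 : a2 = []
  · subst h2
    rw [PySem.List.pyRange_one]
    simp [getEF1Go]
  · rw [if_neg h2]
    dsimp only
    obtain ⟨x, t, rfl⟩ : ∃ x t, a2 = x :: t := by
      cases a2 with
      | nil => exact absurd rfl h2
      | cons x t => exact ⟨x, t, rfl⟩
    rw [goEF]
    · rw [bfold0]
      simp only [Option.getD_some, weightDict_getD]
      have hiff : (∃ i ∈ PySem.List.pyRange 0 ((x :: t).length : Int) 1,
          a1.foldl (fun s p => s + p.2) (0 : Int)
            - (sumW pref1 (x :: t) - wF pref1 ((PySem.List.pyGet? (x :: t) i).getD ("", 0)).1) ≥ 0)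
          ↔ a1.foldl (fun s p => s + p.2) (0 : Int)
            - (0 + wF pref1 x.1 + sumW pref1 t - fm pref1 (wF pref1 x.1) t) ≥ 0 := by
        have hW : sumW pref1 (x :: t) = wF pref1 x.1 + sumW pref1 t := by
          simp [sumW]
        constructor
        · rintro ⟨i, hi, hci⟩
          obtain ⟨hi0, hilen⟩ := (PySem.List.mem_pyRange_one).1 hi
          have hx := PySem.List.pyGet?_eq_some_getElem (xs := x :: t) (i := i) hi0 (by
            simpa using hilen)
          rw [hx, Option.getD_some] at hci
          have hmem : (x :: t)[i.toNat] ∈ x :: t := List.getElem_mem _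
          have hle : wF pref1 ((x :: t)[i.toNat]).1 ≤ fm pref1 (wF pref1 x.1) t := by
            rcases List.mem_cons.1 hmem with he | he
            · rw [he]; exact fm_init_le _ _ _
            · exact fm_mem_le _ _ _ _ he
          rw [hW] at hci
          omega
        · intro hc
          have : ∃ y ∈ x :: t, fm pref1 (wF pref1 x.1) t = wF pref1 y.1 := by
            rcases fm_cases pref1 (wF pref1 x.1) t with h | ⟨y, hy, h⟩
            · exact ⟨x, List.mem_cons_self, h⟩
            · exact ⟨y, List.mem_cons_of_mem _ hy, h⟩
          obtain ⟨y, hy, hfy⟩ := this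
          obtain ⟨k, hk, hky⟩ := List.mem_iff_getElem.1 hy
          refine ⟨(k : Int), (PySem.List.mem_pyRange_one).2 ⟨by positivity, by exact_mod_cast hk⟩, ?_⟩
          rw [PySem.List.pyGet?_natCast]
          rw [List.getElem?_eq_getElem hk]
          simp only [Option.getD_some, hky, hW]
          omega
      rw [if_congr hiff rfl rfl]
    · intro i hi
      obtain ⟨hi0, hilen⟩ := (PySem.List.mem_pyRange_one).1 hi
      exact ⟨_, PySem.List.pyGet?_eq_some_getElem _ hi0 (by simpa using hilen)⟩
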